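-- pv_equiv track=rewrite | github.com/commitcat-dev/python-algorithms | Array/02_배열_제어하기.py | my_solution
-- ===== SOURCE A (Python) =====
-- def my_solution(arr):
--     res = []
--     sortedArr = sorted(arr, reverse=True)
--
--     if len(sortedArr) == 0:
--         return res
--
--     res.append(sortedArr[0])
--     tmp = sortedArr[0]
--
--     for i in sortedArr:
--         if i != tmp:
--             res.append(i)
--             tmp = i
--
--     return res
-- ===== SOURCE B (Python) =====
-- def my_solution(arr):
--     return sorted(set(arr), reverse=True)
-- ===== Notes on version B (the rewrite author's own statement) =====
-- stated objective: simpler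
-- what changed: B dedups first with a hash set and then sorts descending, replacing A's sort-then-adjacent-scan (manual append/tmp loop) with a one-line set-then-sort.
import Mathlib
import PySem

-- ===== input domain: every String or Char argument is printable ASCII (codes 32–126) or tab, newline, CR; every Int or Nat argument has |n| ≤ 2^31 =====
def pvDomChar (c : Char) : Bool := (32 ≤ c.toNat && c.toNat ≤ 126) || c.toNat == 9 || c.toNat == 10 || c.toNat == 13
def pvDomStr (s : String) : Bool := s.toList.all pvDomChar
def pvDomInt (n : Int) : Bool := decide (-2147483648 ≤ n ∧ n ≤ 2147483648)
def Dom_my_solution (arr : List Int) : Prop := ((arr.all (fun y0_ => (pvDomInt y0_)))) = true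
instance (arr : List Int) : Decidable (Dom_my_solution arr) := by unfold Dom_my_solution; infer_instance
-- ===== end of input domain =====

-- B replaces A's sort-then-adjacent-dedup scan by dedup-with-a-set-then-sort-descending (simpler).

-- ===== PORT A =====
-- the loop body: if i != tmp: res.append(i); tmp = i
def pvStepA (p : List Int × Int) (i : Int) : List Int × Int :=
  if i ≠ p.2 then (p.1 ++ [i], i) else p

def my_solution (arr : List Int) : List Int :=
  let sortedArr := PySem.List.sorted arr (fun x => x) true
  match sortedArr with
  | [] => []
  | s0 :: _ => (sortedArr.foldl pvStepA ([s0], s0)).1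

-- ===== PORT B =====
def my_solution_alt (arr : List Int) : List Int :=
  PySem.List.sorted (PySem.Set.ofList arr) (fun x => x) true

-- ===== PRECONDITION & SPEC =====
def Spec_my_solution (arr : List Int) (out : List Int) : Prop := out = my_solution_alt arr
instance (arr : List Int) (out : List Int) : Decidable (Spec_my_solution arr out) := by unfold Spec_my_solution; infer_instance

-- ===== CLAIM (what is proved, stated in full; the proofs are below) =====
def Claim_equal_my_solution : Prop := ∀ (arr : List Int), Dom_my_solution arr → Spec_my_solution arr (my_solution arr)

-- ===== LEMMAS AND PROOFS =====

-- invariant for A's dedup loop: the accumulated result stays strictly decreasing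
-- and collects exactly the elements seen so far
theorem pv_fold_spec (l : List Int) (res : List Int) (tmp : Int)
    (hl : l.Pairwise (fun a b => b ≤ a)) (hle : ∀ x ∈ l, x ≤ tmp)
    (hres : res.Pairwise (· > ·)) (hlast : ∀ x ∈ res, tmp ≤ x) (htmp : tmp ∈ res) :
    (l.foldl pvStepA (res, tmp)).1.Pairwise (· > ·) ∧
    (∀ a, a ∈ (l.foldl pvStepA (res, tmp)).1 ↔ a ∈ res ∨ a ∈ l) := by
  induction l generalizing res tmp with
  | nil => exact ⟨hres, fun a => by simp⟩
  | cons i l ih =>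
    rw [List.pairwise_cons] at hl
    simp only [List.foldl_cons, pvStepA]
    by_cases hi : i = tmp
    · simp only [hi, ne_eq, not_true_eq_false, if_false]
      obtain ⟨h1, h2⟩ := ih res tmp hl.2 (fun x hx => (hl.1 x hx).trans hi.le) hres hlast htmp
      refine ⟨h1, fun a => ?_⟩
      rw [h2]
      constructor
      · rintro (h | h)
        · exact Or.inl h
        · exact Or.inr (List.mem_cons_of_mem _ h)
      · rintro (h | h)
        · exact Or.inl h
        · rcases List.mem_cons.1 h with h | h
          · exact Or.inl (h ▸ hi ▸ htmp)
          · exact Or.inr h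
    · have hlt : i < tmp := lt_of_le_of_ne (hle i (List.mem_cons_self)) hi
      simp only [ne_eq, hi, not_false_eq_true, if_true]
      have hres' : (res ++ [i]).Pairwise (· > ·) := by
        rw [List.pairwise_append]
        refine ⟨hres, List.pairwise_singleton _ _, fun x hx y hy => ?_⟩
        simp only [List.mem_singleton] at hy
        subst hy
        exact lt_of_lt_of_le hlt (hlast x hx)
      obtain ⟨h1, h2⟩ := ih (res ++ [i]) i hl.2 hl.1 hres'
        (fun x hx => by
          rcases List.mem_append.1 hx with h | h
          · exact (hlt.le).trans (hlast x h)
          · simp at h; omega)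
        (List.mem_append.2 (Or.inr (List.mem_singleton.2 rfl)))
      refine ⟨h1, fun a => ?_⟩
      rw [h2]
      simp only [List.mem_append, List.mem_cons]
      tauto

theorem my_solution_eq (arr : List Int) : my_solution arr = my_solution_alt arr := by
  unfold my_solution my_solution_alt
  rcases hs : PySem.List.sorted arr (fun x => x) true with _ | ⟨s0, t⟩
  · have harr : arr = [] := by
      have := PySem.List.sorted_eq_nil_iff (xs := arr) (key := fun x : Int => x) (rev := true)
      simp [hs] at this
      exact this
    subst harr
    rfl
  · simp only
    have hpw : (PySem.List.sorted arr (fun x : Int => x) true).Pairwise (fun a b => b ≤ a) :=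
      PySem.List.sorted_pairwise_rev ..
    rw [hs] at hpw
    have hhead : ∀ y ∈ arr, y ≤ s0 := by
      have := PySem.List.key_head_sorted_rev_ge (xs := arr) (key := fun x : Int => x) hs
      simpa using this
    have hmem : ∀ a : Int, a ∈ s0 :: t ↔ a ∈ arr := by
      intro a
      rw [← hs]
      exact PySem.List.mem_sorted ..
    have hle : ∀ x ∈ s0 :: t, x ≤ s0 := fun x hx => hhead x ((hmem x).1 hx)
    obtain ⟨h1, h2⟩ := pv_fold_spec (s0 :: t) [s0] s0
      hpw hle (List.pairwise_singleton _ _) (by simp) (by simp)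
    symm
    have hnd : (List.foldl pvStepA ([s0], s0) (s0 :: t)).1.Nodup :=
      h1.imp fun h => ne_of_gt h
    have hperm : (List.foldl pvStepA ([s0], s0) (s0 :: t)).1.Perm (PySem.Set.ofList arr) := by
      refine (List.perm_ext_iff_of_nodup hnd (PySem.Set.nodup_ofList arr)).2 fun a => ?_
      rw [h2 a, PySem.Set.mem_ofList, ← hmem a]
      simp only [List.mem_cons]
      tauto
    exact PySem.List.sorted_rev_eq_of_perm_of_pairwise_gt _ _ _ hperm h1

-- ===== VERDICT (by name: the statement is the Claim_ definition above) =====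
theorem my_solution_spec : Claim_equal_my_solution := by
  intro arr _
  exact my_solution_eq arr
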